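-- pv_equiv track=rewrite | github.com/alexandraback/datacollection | solutions_5634697451274240_1/Python/Spelvin/b.py | flipsneeded
-- ===== SOURCE A (Python) =====
-- def leadingpluslength(string):
-- 	if string == '' or string[0] == '-':
-- 		return 0
-- 	return 1 + leadingpluslength(string[1:])
--
-- def latestminusposition(string):
-- 	if string == '':
-- 		return 'None'
-- 	if string[-1] == '-':
-- 		return len(string)-1
-- 	return latestminusposition(string[:-1])
--
-- def flipallcakes(string):
-- 	newstring = ''
-- 	for char in string:
-- 		if char == '+':
-- 			newstring = '-' + newstring
-- 		if char == '-':
-- 			newstring = '+' + newstring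
-- 	return newstring
--
-- def flipsomecakes(string,pos):
-- 	return flipallcakes(string[:(pos+1)]) + string[(pos+1):]
--
-- def flipsneeded(string):
-- 	lmp = latestminusposition(string)
-- 	if lmp == 'None':
-- 		return 0
-- 	if string[0] == '+':
-- 		lpl = leadingpluslength(string)
-- 		return 1 + flipsneeded(flipsomecakes(string,lpl-1))
-- 	else:
-- 		return 1 + flipsneeded(flipsomecakes(string,lmp))
-- ===== SOURCE B (Python) =====
-- def flipsneeded(string):
--     # One pass over the sign characters: each maximal run boundary costs one
--     # flip, plus a final flip if the last sign is '-'.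
--     ops = 0
--     prev = None
--     for ch in string:
--         if ch == '+' or ch == '-':
--             if prev is not None and ch != prev:
--                 ops += 1
--             prev = ch
--     if prev == '-':
--         ops += 1
--     return ops
-- ===== Notes on version B (the rewrite author's own statement) =====
-- stated objective: faster
-- what changed: Replaces the recursive simulation of prefix flip-and-reverse operations (each step rebuilding the string) with a single left-to-right pass counting boundaries between maximal runs of sign characters, plus one if the last sign is '-'.
-- intended difference: On strings whose first character is not a sign but whose first sign character is '+' and which contain a '-', A returns one flip more than needed (its leading-plus scan counts the junk prefix as an extra all-'+' block), while B returns the minimal count, which is the intended value. — e.g. on flipsneeded("a+-"): A returns 3, B returns 2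
import Mathlib
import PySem

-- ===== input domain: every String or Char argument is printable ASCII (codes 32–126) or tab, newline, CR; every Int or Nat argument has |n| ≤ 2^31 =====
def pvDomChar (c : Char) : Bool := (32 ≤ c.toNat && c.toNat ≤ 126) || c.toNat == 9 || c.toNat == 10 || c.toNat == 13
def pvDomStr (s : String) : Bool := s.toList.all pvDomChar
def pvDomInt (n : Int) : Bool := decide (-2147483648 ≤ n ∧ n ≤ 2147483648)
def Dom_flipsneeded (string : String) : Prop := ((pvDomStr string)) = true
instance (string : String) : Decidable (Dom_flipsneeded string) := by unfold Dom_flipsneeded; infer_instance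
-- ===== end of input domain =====

-- B replaces A's recursive simulation of flip-and-reverse operations by one O(n) pass counting sign runs; on strings starting with a non-sign character whose first sign is '+' (and containing '-') A counts one op too many and B returns the intended minimum (see D_).

-- ===== PORT A =====
-- helpers work on the string's character list
-- leadingpluslength
def lplA : List Char → Int
  | [] => 0
  | c :: t => if c = '-' then 0 else 1 + lplA t

-- latestminusposition ('None' ↦ none, an index ↦ some)
def lmpA (s : List Char) : Option Int :=
  if h : s = [] then none
  else if s.getLast h = '-' then some ((s.length : Int) - 1)
  else lmpA s.dropLast
termination_by s.length
decreasing_by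
  have hne : s ≠ [] := by assumption
  have : 0 < s.length := List.length_pos_iff.mpr hne
  simp [List.length_dropLast]; omega

-- flipallcakes (the loop 'newstring = sign + newstring' builds the list front-first)
def flipallA (s : List Char) : List Char :=
  s.foldl (fun ns c => if c = '+' then '-' :: ns else if c = '-' then '+' :: ns else ns) []

-- flipsomecakes
def flipsomeA (s : List Char) (pos : Int) : List Char :=
  flipallA (PySem.List.slice s none (some (pos + 1))) ++ PySem.List.slice s (some (pos + 1)) none

-- flipsneeded's recursion; fuel only makes the recursion total in Lean, it is always
-- sufficient (proved below), so the fueled port computes exactly what Python computes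
def flipsneededFuel : Nat → List Char → Int
  | 0, _ => 0
  | n + 1, s =>
    match lmpA s with
    | none => 0
    | some lmp =>
      match s with
      | [] => 0   -- unreachable: lmpA [] = none
      | c :: _ =>
        if c = '+' then 1 + flipsneededFuel n (flipsomeA s (lplA s - 1))
        else 1 + flipsneededFuel n (flipsomeA s lmp)

def flipsneeded (string : String) : Int :=
  flipsneededFuel (5 * string.toList.length + 2) string.toList

-- ===== PORT B =====
-- the loop state of Source B: (ops, prev); None ↦ none
def altStepB (st : Int × Option Char) (c : Char) : Int × Option Char :=
  if c = '+' ∨ c = '-' then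
    match st.2 with
    | none => (st.1, some c)
    | some p => ((if c ≠ p then st.1 + 1 else st.1), some c)
  else st

def flipsneeded_alt (string : String) : Int :=
  let st := string.toList.foldl altStepB (0, none)
  st.1 + (if st.2 = some '-' then 1 else 0)

-- ===== PRECONDITION & SPEC =====
-- a sign character, and the subsequence of sign characters (used only to state D_)
def isPM (c : Char) : Bool := c == '+' || c == '-'
def core (s : List Char) : List Char := s.filter isPM

-- On strings whose first character is not a sign but whose first sign character is '+'
-- and which contain a '-', A returns one flip more than the minimum (its leading-plus
-- scan counts the junk prefix as an extra all-'+' block); B returns the minimal count,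
-- the intended value.
def D_flipsneeded (string : String) : Prop :=
  (¬ isPM (string.toList.headD '+') = true)
  ∧ (core string.toList).head? = some '+' ∧ '-' ∈ string.toList
instance (string : String) : Decidable (D_flipsneeded string) := by unfold D_flipsneeded; infer_instance

def Spec_flipsneeded (string : String) (out : Int) : Prop :=
  ¬ D_flipsneeded string → out = flipsneeded_alt string
instance (string : String) (out : Int) : Decidable (Spec_flipsneeded string out) := by unfold Spec_flipsneeded; infer_instance

def pvDiffWitness_flipsneeded : String := "a+-"
def pvDiffWitnessOut_flipsneeded : Int × Int := (3, 2)

-- ===== CLAIM (what is proved, stated in full; the proofs are below) =====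
def Claim_unchanged_flipsneeded : Prop := ∀ (string : String), Dom_flipsneeded string → Spec_flipsneeded string (flipsneeded string)
def Claim_changed_flipsneeded : Prop := Dom_flipsneeded (pvDiffWitness_flipsneeded) ∧ D_flipsneeded (pvDiffWitness_flipsneeded) ∧ flipsneeded (pvDiffWitness_flipsneeded) = pvDiffWitnessOut_flipsneeded.1 ∧ flipsneeded_alt (pvDiffWitness_flipsneeded) = pvDiffWitnessOut_flipsneeded.2 ∧ pvDiffWitnessOut_flipsneeded.1 ≠ pvDiffWitnessOut_flipsneeded.2
def Claim_exact_flipsneeded : Prop := ∀ (string : String), Dom_flipsneeded string → D_flipsneeded string → flipsneeded string ≠ flipsneeded_alt string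

-- ===== LEMMAS AND PROOFS =====

def flipC (c : Char) : Char := if c = '+' then '-' else '+'

-- number of adjacent sign changes
def Tn : List Char → Nat
  | [] => 0
  | [_] => 0
  | a :: b :: r => (if a ≠ b then 1 else 0) + Tn (b :: r)

def chg (o : Option Char) (a : Char) : Nat :=
  match o with
  | some g => if g ≠ a then 1 else 0
  | none => 0

-- B's value: sign changes plus one if the last sign is '-'
def phiB (s : List Char) : Int :=
  (Tn (core s) : Int) + (if (core s).getLast? = some '-' then 1 else 0)

-- A's value: phiB plus the D_ correction
def phi (s : List Char) : Int :=
  phiB s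
  + (if ¬ isPM (s.headD '+') ∧ (core s).head? = some '+' ∧ '-' ∈ s then 1 else 0)

-- termination measure of A's recursion
def mu (s : List Char) : Nat :=
  3 * s.length + 2 * Tn (core s) + (if s.headD '+' = '+' then 0 else 1)

lemma Tn_cons (a : Char) (l : List Char) : Tn (a :: l) = chg l.head? a + Tn l := by
  cases l with
  | nil => simp [Tn, chg]
  | cons b r =>
    rcases eq_or_ne a b with h | h
    · simp [Tn, chg, h]
    · simp [Tn, chg, h, Ne.symm h]

lemma Tn_append_cons (x : List Char) (a : Char) (y : List Char) :
    Tn (x ++ a :: y) = Tn x + chg x.getLast? a + Tn (a :: y) := by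
  induction x with
  | nil => simp [Tn, chg]
  | cons b x ih =>
    cases x with
    | nil => simp [Tn, chg]
    | cons c x' =>
      have h1 : Tn (b :: c :: x' ++ a :: y) = (if b ≠ c then 1 else 0) + Tn ((c :: x') ++ a :: y) := by
        simp [Tn]
      have h2 : Tn (b :: c :: x') = (if b ≠ c then 1 else 0) + Tn (c :: x') := by simp [Tn]
      rw [List.cons_append] at h1 ⊢
      rw [h1, ih, h2, List.getLast?_cons_cons]
      ring

lemma Tn_snoc (x : List Char) (a : Char) : Tn (x ++ [a]) = Tn x + chg x.getLast? a := by
  have := Tn_append_cons x a []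
  simpa [Tn] using this

lemma Tn_reverse (l : List Char) : Tn l.reverse = Tn l := by
  induction l with
  | nil => rfl
  | cons a l ih =>
    rw [List.reverse_cons, Tn_snoc, ih, List.getLast?_reverse, Tn_cons]
    ring

lemma flip_ne_iff (g a : Char) (hg : isPM g) (ha : isPM a) : (flipC g ≠ flipC a) ↔ g ≠ a := by
  rcases (by simpa [isPM] using hg : g = '+' ∨ g = '-') with rfl | rfl <;>
    rcases (by simpa [isPM] using ha : a = '+' ∨ a = '-') with rfl | rfl <;> simp [flipC]

lemma Tn_map_flip (l : List Char) (h : ∀ a ∈ l, isPM a) : Tn (l.map flipC) = Tn l := by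
  induction l with
  | nil => rfl
  | cons a l ih =>
    rw [List.map_cons, Tn_cons, Tn_cons, ih (fun b hb => h b (List.mem_cons_of_mem _ hb)),
      List.head?_map]
    congr 1
    cases hl : l.head? with
    | none => rfl
    | some g =>
      have hgm : g ∈ l := List.mem_of_mem_head? hl
      simp only [Option.map_some, chg]
      rw [if_congr (flip_ne_iff g a (h g (List.mem_cons_of_mem _ hgm)) (h a List.mem_cons_self)) rfl rfl]

lemma Tn_const (l : List Char) (k : Char) (h : ∀ a ∈ l, a = k) : Tn l = 0 := by
  induction l with
  | nil => rfl
  | cons a l ih =>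
    rw [Tn_cons, ih (fun b hb => h b (List.mem_cons_of_mem _ hb))]
    cases hl : l.head? with
    | none => rfl
    | some g =>
      have hg : g ∈ l := List.mem_of_mem_head? (by simp [hl])
      simp [chg, h a List.mem_cons_self, h g (List.mem_cons_of_mem _ hg)]

lemma Tn_le_length (l : List Char) : Tn l ≤ l.length := by
  induction l with
  | nil => simp [Tn]
  | cons a l ih =>
    rw [Tn_cons]
    have : chg l.head? a ≤ 1 := by
      cases l.head? with
      | none => simp [chg]
      | some g => simp only [chg]; split <;> omega
    simp only [List.length_cons]; omega

lemma getLast?_const (l : List Char) (k : Char) (h : ∀ a ∈ l, a = k) (hne : l ≠ []) :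
    l.getLast? = some k := by
  rw [List.getLast?_eq_some_getLast hne]
  exact congrArg some (h _ (List.getLast_mem hne))

-- ==== A-side characterisations ====

lemma lmpA_nil : lmpA [] = none := by simp [lmpA]

lemma lmpA_snoc (s : List Char) (c : Char) :
    lmpA (s ++ [c]) = if c = '-' then some (s.length : Int) else lmpA s := by
  have hne : s ++ [c] ≠ [] := by simp
  rw [lmpA, dif_neg hne]
  have hlast : (s ++ [c]).getLast hne = c := List.getLast_concat
  rw [hlast, List.dropLast_concat]
  congr 1
  simp

lemma lmpA_append_no_minus (q t : List Char) (h : '-' ∉ t) : lmpA (q ++ t) = lmpA q := by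
  induction t using List.reverseRecOn with
  | nil => simp
  | append_singleton t c ih =>
    have hc : c ≠ '-' := by intro hc; exact h (by simp [hc])
    rw [← List.append_assoc, lmpA_snoc, if_neg hc]
    exact ih (fun hm => h (by simp [hm]))

lemma lmpA_none_of_no_minus (s : List Char) (h : '-' ∉ s) : lmpA s = none := by
  have := lmpA_append_no_minus [] s h
  simpa [lmpA_nil] using this

lemma exists_last_minus (s : List Char) (h : '-' ∈ s) :
    ∃ q t, s = q ++ '-' :: t ∧ '-' ∉ t := by
  induction s using List.reverseRecOn with
  | nil => simp at h
  | append_singleton l c ih =>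
    rcases eq_or_ne c '-' with rfl | hc
    · exact ⟨l, [], by simp⟩
    · have hl : '-' ∈ l := by
        rcases List.mem_append.mp h with h1 | h1
        · exact h1
        · simp at h1; exact absurd h1.symm hc
      obtain ⟨q, t, rfl, hnt⟩ := ih hl
      exact ⟨q, t ++ [c], by simp, by simp [hnt, Ne.symm hc]⟩

lemma exists_first_minus (s : List Char) (h : '-' ∈ s) :
    ∃ w t, s = w ++ '-' :: t ∧ '-' ∉ w ∧ lplA s = (w.length : Int) := by
  induction s with
  | nil => simp at h
  | cons c r ih =>
    rcases eq_or_ne c '-' with rfl | hc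
    · exact ⟨[], r, by simp, by simp, by simp [lplA]⟩
    · have hr : '-' ∈ r := by
        rcases List.mem_cons.mp h with h1 | h1
        · exact absurd h1.symm hc
        · exact h1
      obtain ⟨w, t, hdec, hnw, hlpl⟩ := ih hr
      refine ⟨c :: w, t, by simp [hdec], by simp [hnw, Ne.symm hc], ?_⟩
      rw [lplA, if_neg hc, hlpl]
      simp
      ring

lemma flipallA_aux (s acc : List Char) :
    s.foldl (fun ns c => if c = '+' then '-' :: ns else if c = '-' then '+' :: ns else ns) acc
      = ((core s).map flipC).reverse ++ acc := by
  induction s generalizing acc with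
  | nil => simp [core]
  | cons c r ih =>
    rcases eq_or_ne c '+' with rfl | h1
    · simp only [List.foldl_cons, ih]
      simp [core, isPM, flipC]
    · rcases eq_or_ne c '-' with rfl | h2
      · simp only [List.foldl_cons, ih]
        simp [core, isPM, flipC]
      · simp only [List.foldl_cons, if_neg h1, if_neg h2, ih]
        have : isPM c = false := by simp [isPM, h1, h2]
        simp [core, this]

lemma flipallA_eq (s : List Char) : flipallA s = ((core s).map flipC).reverse := by
  rw [flipallA, flipallA_aux]
  simp

lemma getLast?_cons_getLastD (a : Char) (l : List Char) : (a :: l).getLast? = some (l.getLastD a) := by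
  induction l generalizing a with
  | nil => rfl
  | cons b r ih => rw [List.getLast?_cons_cons, ih, List.getLastD_cons]

lemma core_append (x y : List Char) : core (x ++ y) = core x ++ core y := by
  simp [core]

lemma core_cons_minus (t : List Char) : core ('-' :: t) = '-' :: core t := by
  simp [core, isPM]

lemma core_pm (s : List Char) : ∀ a ∈ core s, isPM a := fun _ ha => (List.mem_filter.mp ha).2

lemma core_idem_of_pm (l : List Char) (h : ∀ a ∈ l, isPM a) : core l = l :=
  List.filter_eq_self.mpr h

lemma pm_cases (c : Char) (h : isPM c = true) : c = '+' ∨ c = '-' := by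
  simpa [isPM] using h

lemma core_no_minus_all_plus (s : List Char) (h : '-' ∉ s) : ∀ a ∈ core s, a = '+' := by
  intro a ha
  rcases pm_cases a (core_pm s a ha) with h1 | h1
  · exact h1
  · exact absurd (h1 ▸ (List.mem_filter.mp ha).1) h

-- ==== the two step identities ====

lemma plus_step (s : List Char) (hhead : s.head? = some '+') (hmem : '-' ∈ s) :
    phi s = 1 + phi (flipsomeA s (lplA s - 1)) ∧ mu (flipsomeA s (lplA s - 1)) < mu s := by
  obtain ⟨w, t, hdec, hnw, hlpl⟩ := exists_first_minus s hmem
  have harg : lplA s - 1 + 1 = ((w.length : Nat) : Int) := by rw [hlpl]; ring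
  have hnew : flipsomeA s (lplA s - 1) = ((core w).map flipC).reverse ++ '-' :: t := by
    rw [flipsomeA, harg, PySem.List.slice_to_natCast, PySem.List.slice_from_natCast, hdec,
        List.take_left, List.drop_left, flipallA_eq]
  -- w starts with '+'
  obtain ⟨w', rfl⟩ : ∃ w', w = '+' :: w' := by
    cases w with
    | nil => rw [hdec] at hhead; simp at hhead
    | cons a w' =>
      rw [hdec] at hhead; simp at hhead
      exact ⟨w', by rw [hhead]⟩
  set P := core ('+' :: w') with hP
  have hPall : ∀ a ∈ P, a = '+' := core_no_minus_all_plus _ hnw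
  have hPcons : ∃ P', P = '+' :: P' := ⟨core w', by simp [hP, core, isPM]⟩
  obtain ⟨P', hP'⟩ := hPcons
  set M := (P.map flipC).reverse with hM
  have hMall : ∀ a ∈ M, a = '-' := by
    intro a ha
    rw [hM, List.mem_reverse, List.mem_map] at ha
    obtain ⟨b, hb, rfl⟩ := ha
    rw [hPall b hb]; rfl
  have hMcons : ∃ M', M = '-' :: M' := by
    have : M ≠ [] := by simp [hM, hP']
    cases hM2 : M with
    | nil => exact absurd hM2 this
    | cons m M' => exact ⟨M', by rw [hMall m (by rw [hM2]; exact List.mem_cons_self)]⟩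
  obtain ⟨M', hM'⟩ := hMcons
  have hMpm : ∀ a ∈ M, isPM a := fun a ha => by rw [hMall a ha]; rfl
  -- cores
  have hcs : core s = P ++ '-' :: core t := by
    rw [hdec, core_append, core_cons_minus, hP]
  have hcn : core (flipsomeA s (lplA s - 1)) = M ++ '-' :: core t := by
    rw [hnew, core_append, core_cons_minus, core_idem_of_pm M hMpm]
  -- Tn values
  have hTs : Tn (core s) = Tn ('-' :: core t) + 1 := by
    rw [hcs, Tn_append_cons, Tn_const P '+' hPall,
        getLast?_const P '+' hPall (by rw [hP']; simp)]
    simp [chg]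
    omega
  have hTn : Tn (core (flipsomeA s (lplA s - 1))) = Tn ('-' :: core t) := by
    rw [hcn, Tn_append_cons, Tn_const M '-' hMall,
        getLast?_const M '-' hMall (by rw [hM']; simp)]
    simp [chg]
  -- getLast?
  have hLs : (core s).getLast? = ('-' :: core t).getLast? := by
    rw [hcs]; exact List.getLast?_append_of_ne_nil P (by simp)
  have hLn : (core (flipsomeA s (lplA s - 1))).getLast? = ('-' :: core t).getLast? := by
    rw [hcn]; exact List.getLast?_append_of_ne_nil M (by simp)
  constructor
  · -- phi identity
    rw [phi, phi, phiB, phiB, hTs, hTn, hLs, hLn, hnew, hM', hdec]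
    have h1 : (('+' :: w' ++ '-' :: t).headD '+') = '+' := by simp
    have h2 : ((('-' :: M') ++ '-' :: t).headD '+') = '-' := by simp
    rw [h1, h2]
    simp only [isPM, if_neg (by simp : ¬ (¬ (('+' == '+' || '+' == '-') = true) ∧ (core ('+' :: w' ++ '-' :: t)).head? = some '+' ∧ '-' ∈ '+' :: w' ++ '-' :: t)),
               if_neg (by simp : ¬ (¬ (('-' == '+' || '-' == '-') = true) ∧ (core (('-' :: M') ++ '-' :: t)).head? = some '+' ∧ '-' ∈ ('-' :: M') ++ '-' :: t))]
    push_cast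
    ring
  · -- mu decrease
    rw [mu, mu, hTs, hTn, hnew, hM', hdec]
    have hlen : M.length = P.length := by rw [hM]; simp
    have hlP : P.length ≤ ('+' :: w').length := by rw [hP]; exact List.length_filter_le _ _
    have h1 : (('+' :: w' ++ '-' :: t).headD '+') = '+' := by simp
    have h2 : ((('-' :: M') ++ '-' :: t).headD '+') = '-' := by simp
    rw [h1, h2, if_pos rfl, if_neg (by decide)]
    have e1 : (('-' :: M') ++ '-' :: t).length = M.length + t.length + 1 := by rw [hM']; simp; omega
    have e2 : ('+' :: w' ++ '-' :: t).length = ('+' :: w').length + t.length + 1 := by simp; omega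
    rw [e1, e2]
    omega

lemma minus_step (s : List Char) (c : Char) (t0 : List Char) (hs : s = c :: t0) (hc : c ≠ '+')
    (q t : List Char) (hdec : s = q ++ '-' :: t) (ht : '-' ∉ t) :
    phi s = 1 + phi (flipsomeA s ((q.length : Int))) ∧ mu (flipsomeA s ((q.length : Int))) < mu s := by
  have hmem : '-' ∈ s := by rw [hdec]; simp
  have hCpm : ∀ a ∈ core q, isPM a := core_pm q
  have hRpm : ∀ a ∈ ((core q).map flipC).reverse, isPM a := by
    intro a ha
    rw [List.mem_reverse, List.mem_map] at ha
    obtain ⟨b, hb, rfl⟩ := ha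
    rcases pm_cases b (hCpm b hb) with rfl | rfl <;> decide
  -- the new string
  have harg : (q.length : Int) + 1 = ((q.length + 1 : Nat) : Int) := by push_cast; ring
  have hsplit : s = (q ++ ['-']) ++ t := by rw [hdec]; simp
  have hlen1 : (q ++ ['-']).length = q.length + 1 := by simp
  have htake : s.take (q.length + 1) = q ++ ['-'] := by
    rw [hsplit, ← hlen1]; exact List.take_left
  have hdrop : s.drop (q.length + 1) = t := by
    rw [hsplit, ← hlen1]; exact List.drop_left
  have hrev : ((core (q ++ ['-'])).map flipC).reverse = '+' :: ((core q).map flipC).reverse := by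
    rw [core_append, List.map_append]
    have : core ['-'] = ['-'] := by decide
    rw [this]
    simp [flipC]
  have hnew : flipsomeA s ((q.length : Int)) = '+' :: (((core q).map flipC).reverse ++ t) := by
    rw [flipsomeA, harg, PySem.List.slice_to_natCast, PySem.List.slice_from_natCast, htake, hdrop,
        flipallA_eq, hrev]
    simp
  have ht' : ∀ a ∈ core t, a = '+' := core_no_minus_all_plus t ht
  -- the first core character h0
  obtain ⟨h0, hh0⟩ : ∃ h0, (core q ++ ['-']).head? = some h0 := by
    cases core q <;> exact ⟨_, rfl⟩
  have hpm0 : isPM h0 := by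
    rcases hCl : core q with _ | ⟨c0, C'⟩
    · rw [hCl] at hh0; simp at hh0; rw [← hh0]; decide
    · rw [hCl] at hh0; simp at hh0
      rw [← hh0]
      exact hCpm c0 (by rw [hCl]; exact List.mem_cons_self)
  have hcs : core s = core q ++ '-' :: core t := by
    rw [hdec, core_append, core_cons_minus]
  have hhead_cs : (core s).head? = some h0 := by
    rw [hcs]
    rcases hCl : core q with _ | ⟨c0, C'⟩
    · rw [hCl] at hh0; simpa using hh0
    · rw [hCl] at hh0; simpa using hh0
  have hch : h0 = '+' → isPM c = false := by
    intro hh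
    cases q with
    | nil =>
      have : core ([] : List Char) = [] := rfl
      rw [this] at hh0
      simp at hh0
      rw [hh] at hh0; exact absurd hh0 (by decide)
    | cons q0 q' =>
      have hq0 : q0 = c := by
        have h3 := hdec.symm.trans hs
        simp at h3
        exact h3.1
      by_cases hpmc : isPM c
      · have hpmq : isPM q0 = true := by rw [hq0]; exact hpmc
        have : core (q0 :: q') = q0 :: core q' := by simp [core, hpmq]
        rw [this] at hh0; simp at hh0
        rw [hh, hq0] at hh0
        exact absurd hh0 hc
      · simpa using hpmc
  -- Tn of '+' :: R and its last element
  have hRform : '+' :: ((core q).map flipC).reverse = (List.map flipC (core q ++ ['-'])).reverse := by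
    rw [List.map_append]
    simp [flipC]
  have hTplus : Tn ('+' :: ((core q).map flipC).reverse) = Tn (core q) + chg (core q).getLast? '-' := by
    rw [hRform, Tn_reverse, Tn_map_flip, Tn_snoc]
    intro a ha
    rcases List.mem_append.mp ha with h1 | h1
    · exact hCpm a h1
    · simp at h1; rw [h1]; decide
  have hLplus : ('+' :: ((core q).map flipC).reverse).getLast? = some (flipC h0) := by
    rw [hRform, List.getLast?_reverse, List.head?_map, hh0]; rfl
  have hchg : chg (some (flipC h0)) '+' = if h0 = '+' then 1 else 0 := by
    rcases pm_cases h0 hpm0 with rfl | rfl <;> decide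
  -- the junk-head correction on s equals [h0 = '+']
  have hcorr : (if (¬ isPM (s.headD '+') = true) ∧ (core s).head? = some '+' ∧ '-' ∈ s then (1:Int) else 0)
      = if h0 = '+' then 1 else 0 := by
    rw [hhead_cs, hs]
    simp only [List.headD_cons]
    by_cases hh : h0 = '+'
    · rw [if_pos ⟨by simp [hch hh], by rw [hh], hs ▸ hmem⟩, if_pos hh]
    · rw [if_neg hh]
      apply if_neg
      rintro ⟨-, h2, -⟩
      exact hh (Option.some.inj h2)
  have hcorrnew : (if (¬ isPM (('+' :: (((core q).map flipC).reverse ++ t)).headD '+') = true)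
      ∧ (core ('+' :: (((core q).map flipC).reverse ++ t))).head? = some '+'
      ∧ '-' ∈ '+' :: (((core q).map flipC).reverse ++ t) then (1:Int) else 0) = 0 := by
    have hnotc : ¬ ((¬ isPM (('+' :: (((core q).map flipC).reverse ++ t)).headD '+') = true)
        ∧ (core ('+' :: (((core q).map flipC).reverse ++ t))).head? = some '+'
        ∧ '-' ∈ '+' :: (((core q).map flipC).reverse ++ t)) := by
      rintro ⟨h1, -, -⟩
      exact h1 (by rw [List.headD_cons]; decide)
    exact if_neg hnotc
  have hcorenew : core ('+' :: (((core q).map flipC).reverse ++ t))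
      = ('+' :: ((core q).map flipC).reverse) ++ core t := by
    have h1 : core ('+' :: (((core q).map flipC).reverse ++ t))
        = '+' :: core ((((core q).map flipC).reverse ++ t)) := by simp [core, isPM]
    rw [h1, core_append, core_idem_of_pm _ hRpm]
    rfl
  have hlenR : (((core q).map flipC).reverse).length = (core q).length := by simp
  have hlenq : (core q).length ≤ q.length := List.length_filter_le _ _
  have hlens : s.length = q.length + 1 + t.length := by rw [hdec]; simp; omega
  have hheadDs : s.headD '+' = c := by rw [hs]; rfl
  rcases htc : core t with _ | ⟨a0, t''⟩
  · -- no '+' after the last '-'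
    have hcs0 : core s = core q ++ ['-'] := by rw [hcs, htc]
    have hTS : Tn (core s) = Tn (core q) + chg (core q).getLast? '-' := by rw [hcs0, Tn_snoc]
    have hgs : (core s).getLast? = some '-' := by rw [hcs0]; simp
    have hTN : Tn (core ('+' :: (((core q).map flipC).reverse ++ t)))
        = Tn (core q) + chg (core q).getLast? '-' := by
      rw [hcorenew, htc, List.append_nil, hTplus]
    constructor
    · rw [phi, phi, phiB, phiB, hnew, hcorrnew, hTN, hTS, hgs, hcorenew, htc, List.append_nil, hLplus, hcorr]
      have hgn : (if some (flipC h0) = some '-' then (1:Int) else 0) = if h0 = '+' then 1 else 0 := by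
        rcases pm_cases h0 hpm0 with rfl | rfl <;> decide
      rw [if_pos rfl, hgn]
      push_cast
      ring
    · rw [mu, mu, hnew, hTN, hTS, hheadDs, if_neg hc]
      simp only [List.headD_cons, List.length_cons, List.length_append, hlenR]
      norm_num
      omega
  · -- a (all-'+') tail after the last '-'
    have ha0 : a0 = '+' := ht' a0 (by rw [htc]; exact List.mem_cons_self)
    subst ha0
    have hallt : ∀ a ∈ '+' :: t'', a = '+' := by rw [← htc]; exact ht'
    have hTminus : Tn ('-' :: '+' :: t'') = 1 := by
      have h1 : Tn ('+' :: t'') = 0 := Tn_const _ '+' hallt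
      rw [Tn, h1, if_pos (by decide)]
    have hTS : Tn (core s) = Tn (core q) + chg (core q).getLast? '-' + 1 := by
      rw [hcs, htc, Tn_append_cons, hTminus]
    have hgs : (core s).getLast? = some '+' := by
      rw [hcs, htc]
      have h9 : (core q ++ '-' :: '+' :: t'').getLast? = ('-' :: '+' :: t'').getLast? :=
        List.getLast?_append_of_ne_nil _ (by simp)
      rw [h9, List.getLast?_cons_cons]
      exact getLast?_const _ '+' hallt (by simp)
    have hTN : Tn (core ('+' :: (((core q).map flipC).reverse ++ t)))
        = Tn (core q) + chg (core q).getLast? '-' + (if h0 = '+' then 1 else 0) := by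
      rw [hcorenew, htc, Tn_append_cons, hTplus, Tn_const _ '+' hallt, hLplus, hchg]
      omega
    have hgn : (core ('+' :: (((core q).map flipC).reverse ++ t))).getLast? = some '+' := by
      rw [hcorenew, htc]
      have h9 : (('+' :: ((core q).map flipC).reverse) ++ '+' :: t'').getLast? = ('+' :: t'').getLast? :=
        List.getLast?_append_of_ne_nil _ (by simp)
      rw [h9]
      exact getLast?_const _ '+' hallt (by simp)
    constructor
    · rw [phi, phi, phiB, phiB, hnew, hcorrnew, hTN, hTS, hgs, hgn, hcorr]
      have hred : (if (some '+' : Option Char) = some '-' then (1:Int) else 0) = 0 := by decide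
      rw [hred]
      push_cast
      ring
    · rw [mu, mu, hnew, hTN, hTS, hheadDs, if_neg hc]
      simp only [List.headD_cons, List.length_cons, List.length_append, hlenR]
      norm_num
      have : (if h0 = '+' then 1 else 0) ≤ 1 := by split <;> omega
      omega

-- ==== main inductions ====

lemma fuel_eq_phi : ∀ n s, mu s < n → flipsneededFuel n s = phi s := by
  intro n
  induction n with
  | zero => intro s h; exact absurd h (Nat.not_lt_zero _)
  | succ n ih =>
    intro s hmu
    by_cases hm : '-' ∈ s
    · obtain ⟨q, t, hdec, ht⟩ := exists_last_minus s hm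
      have hlmp : lmpA s = some (q.length : Int) := by
        have h1 : s = (q ++ ['-']) ++ t := by rw [hdec]; simp
        rw [h1, lmpA_append_no_minus _ _ ht, lmpA_snoc, if_pos rfl]
      obtain ⟨c, t0, hs⟩ : ∃ c t0, s = c :: t0 := by
        cases s with
        | nil => simp at hm
        | cons c t0 => exact ⟨c, t0, rfl⟩
      subst hs
      rw [flipsneededFuel, hlmp]
      show (if c = '+' then 1 + flipsneededFuel n (flipsomeA (c :: t0) (lplA (c :: t0) - 1))
            else 1 + flipsneededFuel n (flipsomeA (c :: t0) ((q.length : Nat) : Int))) = phi (c :: t0)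
      by_cases hcp : c = '+'
      · rw [if_pos hcp]
        have hhead : (c :: t0).head? = some '+' := by rw [hcp]; rfl
        obtain ⟨hphi, hmu2⟩ := plus_step (c :: t0) hhead hm
        rw [ih _ (by omega), hphi]
      · rw [if_neg hcp]
        obtain ⟨hphi, hmu2⟩ := minus_step (c :: t0) c t0 rfl hcp q t hdec ht
        rw [ih _ (by omega), hphi]
    · rw [flipsneededFuel, lmpA_none_of_no_minus s hm]
      have hall := core_no_minus_all_plus s hm
      have h1 : Tn (core s) = 0 := Tn_const _ '+' hall
      have h2 : (if (core s).getLast? = some '-' then (1:Int) else 0) = 0 := by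
        rcases hcs : core s with _ | ⟨a, l⟩
        · simp
        · rw [getLast?_const (a :: l) '+' (hcs ▸ hall) (by simp)]; decide
      have h3 : (if (¬ isPM (s.headD '+') = true) ∧ (core s).head? = some '+' ∧ '-' ∈ s
          then (1:Int) else 0) = 0 := if_neg (fun h => hm h.2.2)
      rw [phi, phiB, h1, h2, h3]
      simp

-- ==== B-side ====

lemma foldl_altStepB_core (s : List Char) :
    ∀ st, s.foldl altStepB st = (core s).foldl altStepB st := by
  induction s with
  | nil => intro st; rfl
  | cons c r ih =>
    intro st
    by_cases hpm : isPM c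
    · have h1 : core (c :: r) = c :: core r := by simp [core, hpm]
      rw [h1, List.foldl_cons, List.foldl_cons, ih]
    · have h1 : core (c :: r) = core r := by simp [core, hpm]
      have h2 : altStepB st c = st := by
        have h3 : ¬ (c = '+' ∨ c = '-') := by
          intro h4
          rcases h4 with h4 | h4 <;> simp [isPM, h4] at hpm
        simp [altStepB, h3]
      rw [h1, List.foldl_cons, h2, ih]

lemma altStepB_run (l : List Char) (hl : ∀ a ∈ l, isPM a) :
    ∀ (ops : Int) (p : Char),
      l.foldl altStepB (ops, some p) = (ops + (Tn (p :: l) : Int), some (l.getLastD p)) := by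
  induction l with
  | nil => intro ops p; simp [Tn]
  | cons c r ih =>
    intro ops p
    have hcpm : c = '+' ∨ c = '-' := pm_cases c (hl c List.mem_cons_self)
    have h1 : altStepB (ops, some p) c = ((if c ≠ p then ops + 1 else ops), some c) := by
      simp [altStepB, hcpm]
    rw [List.foldl_cons, h1, ih (fun a ha => hl a (List.mem_cons_of_mem _ ha))]
    have h2 : Tn (p :: c :: r) = (if p ≠ c then 1 else 0) + Tn (c :: r) := by simp [Tn]
    rw [h2, List.getLastD_cons]
    rcases eq_or_ne c p with rfl | hne
    · simp
    · rw [if_pos hne, if_pos (Ne.symm hne)]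
      push_cast
      ring_nf

lemma alt_eq_phiB (string : String) : flipsneeded_alt string = phiB string.toList := by
  rw [flipsneeded_alt, foldl_altStepB_core]
  rcases hc : core string.toList with _ | ⟨c0, cl⟩
  · rw [phiB, hc]
    simp [Tn]
  · have hpm : ∀ a ∈ c0 :: cl, isPM a := fun a ha => core_pm string.toList a (hc ▸ ha)
    have hstep : altStepB ((0 : Int), none) c0 = ((0 : Int), some c0) := by
      simp [altStepB, pm_cases c0 (hpm c0 List.mem_cons_self)]
    have h1 : (c0 :: cl).foldl altStepB ((0 : Int), none)
        = ((0 : Int) + (Tn (c0 :: cl) : Int), some (cl.getLastD c0)) := by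
      rw [List.foldl_cons, hstep]
      exact altStepB_run cl (fun a ha => hpm a (List.mem_cons_of_mem _ ha)) 0 c0
    rw [h1, phiB, hc, getLast?_cons_getLastD]
    dsimp only
    ring

lemma phi_split (s : List Char) :
    phi s = phiB s + (if ¬ isPM (s.headD '+') ∧ (core s).head? = some '+' ∧ '-' ∈ s then 1 else 0) := rfl

lemma A_eq_phi (string : String) : flipsneeded string = phi string.toList := by
  unfold flipsneeded
  apply fuel_eq_phi
  have h1 : Tn (core string.toList) ≤ string.toList.length :=
    le_trans (Tn_le_length _) (List.length_filter_le _ _)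
  unfold mu
  split <;> omega

-- ===== VERDICT (by name: the statements are the Claim_ definitions above) =====
theorem flipsneeded_spec : Claim_unchanged_flipsneeded := by
  intro s _
  unfold Spec_flipsneeded
  intro hnD
  rw [A_eq_phi, alt_eq_phiB, phi_split]
  rw [if_neg (by unfold D_flipsneeded at hnD; exact hnD)]
  ring

theorem flipsneeded_changed : Claim_changed_flipsneeded := by
  unfold Claim_changed_flipsneeded
  refine ⟨by decide, by decide, ?_, by decide, by decide⟩
  rw [A_eq_phi]
  decide

theorem flipsneeded_tight : Claim_exact_flipsneeded := by
  intro s _ hD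
  rw [A_eq_phi, alt_eq_phiB, phi_split]
  rw [if_pos (by unfold D_flipsneeded at hD; exact hD)]
  omega
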